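/- GENERATED by c/gen_decode.py: decode facts of the image, one per distinct instruction byte string. -/
import UserX.DecodeImage

#decode_all Vorbis.Dec
  "038398000000"  -- add eax,DWORD PTR [rbx+0x98]
  "0f8414010000"  -- je 1071ae
  "0f84d4feffff"  -- je 10f4ed
  "0f87c4000000"  -- ja 108e9e
  "0f8ebefcffff"  -- jle 114dfa
  "0fb65b02"  -- movzx ebx,BYTE PTR [rbx+0x2]
  "38c2"  -- cmp dl,al
  "410faf1e"  -- imul ebx,DWORD PTR [r14]
  "4139c5"  -- cmp r13d,eax
  "4183fd01"  -- cmp r13d,0x1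
  "4189ff"  -- mov r15d,edi
  "41c1fc02"  -- sar r12d,0x2
  "428d04ad00000000"  -- lea eax,[r13*4+0x0]
  "4439742404"  -- cmp DWORD PTR [rsp+0x4],r14d
  "44896b08"  -- mov DWORD PTR [rbx+0x8],r13d
  "4489e2"  -- mov edx,r12d
  "448b7c2470"  -- mov r15d,DWORD PTR [rsp+0x70]
  "450fb76c5f04"  -- movzx r13d,WORD PTR [r15+rbx*2+0x4]
  "4589f1"  -- mov r9d,r14d
  "478d3c26"  -- lea r15d,[r14+r12*1]
  "486345bc"  -- movsxd rax,DWORD PTR [rbp-0x44]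
  "4881ec88000000"  -- sub rsp,0x88
  "4885ed"  -- test rbp,rbp
  "4889c6"  -- mov rsi,rax
  "488b5c2418"  -- mov rbx,QWORD PTR [rsp+0x18]
  "488d049d20000000"  -- lea rax,[rbx*4+0x20]
  "488d7b01"  -- lea rdi,[rbx+0x1]
  "488d7dfc"  -- lea rdi,[rbp-0x4]
  "488dbbd5060000"  -- lea rdi,[rbx+0x6d5]
  "488dbf98000000"  -- lea rdi,[rdi+0x98]
  "48c7819400c00000000000"  -- mov QWORD PTR [rcx+0xc00094],0x0
  "49636e04"  -- movsxd rbp,DWORD PTR [r14+0x4]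
  "4989de"  -- mov r14,rbx
  "498d7c24e8"  -- lea rdi,[r12-0x18]
  "498dbed3060000"  -- lea rdi,[r14+0x6d3]
  "4a8d7cbc50"  -- lea rdi,[rsp+r15*4+0x50]
  "4c03bd38080000"  -- add r15,QWORD PTR [rbp+0x838]
  "4c89c0"  -- mov rax,r8
  "4c8b7dc8"  -- mov r15,QWORD PTR [rbp-0x38]
  "4c8dadb6000000"  -- lea r13,[rbp+0xb6]
  "4d8bac24a8000000"  -- mov r13,QWORD PTR [r12+0xa8]
  "660f28d0"  -- movapd xmm2,xmm0
  "66410f6ee6"  -- movd xmm4,r14d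
  "66490f7ec7"  -- movq r15,xmm0
  "741d"  -- je 1024e3
  "7507"  -- jne 100b62
  "7733"  -- ja 1004bc
  "7e08"  -- jle 1071ae
  "7fbe"  -- jg 1098ad
  "83bb7405000000"  -- cmp DWORD PTR [rbx+0x574],0x0
  "85ff"  -- test edi,edi
  "896c2450"  -- mov DWORD PTR [rsp+0x50],ebp
  "89ef"  -- mov edi,ebp
  "8b5c2408"  -- mov ebx,DWORD PTR [rsp+0x8]
  "8b93e4060000"  -- mov edx,DWORD PTR [rbx+0x6e4]
  "b900000000"  -- mov ecx,0x0
  "c1e808"  -- shr eax,0x8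
  "c780c800c000f2f2f2f2"  -- mov DWORD PTR [rax+0xc000c8],0xf2f2f2f2
  "d3fa"  -- sar edx,cl
  "e809b6feff"  -- call 101520
  "e8148bffff"  -- call 103f80
  "e81c96ffff"  -- call 100800
  "e827abfeff"  -- call 100640
  "e82fc7feff"  -- call 100800
  "e839cafeff"  -- call 100720
  "e8456cffff"  -- call 10d1c0
  "e84f95ffff"  -- call 100640
  "e85accffff"  -- call 108f20
  "e8694fffff"  -- call 108f20
  "e87417ffff"  -- call 100800
  "e87e54ffff"  -- call 100720
  "e889d5feff"  -- call 1003c0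
  "e893bfffff"  -- call 105740
  "e89e10ffff"  -- call 104d40
  "e8a88effff"  -- call 10d1c0
  "e8b1edfeff"  -- call 100640
  "e8bbfffeff"  -- call 101440
  "e8c6fefeff"  -- call 103d00
  "e8d076ffff"  -- call 100640
  "e8dae9feff"  -- call 103d00
  "e8e488ffff"  -- call 100800
  "e8ecd2feff"  -- call 100640
  "e8f715ffff"  -- call 100800
  "e909ffffff"  -- jmp 112f26
  "e94cffffff"  -- jmp 1116e1
  "e9a2d9ffff"  -- jmp 113b22
  "e9f4000000"  -- jmp 110d93
  "eb82"  -- jmp 114e48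
  "ebe1"  -- jmp 108e7f
  "f20f5805b3d70100"  -- addsd xmm0,QWORD PTR [rip+0x1d7b3]
  "f20f5e1573da0100"  -- divsd xmm2,QWORD PTR [rip+0x1da73]
  "f30f1053d4"  -- movss xmm2,DWORD PTR [rbx-0x2c]
  "f30f10742420"  -- movss xmm6,DWORD PTR [rsp+0x20]
  "f30f1153e4"  -- movss DWORD PTR [rbx-0x1c],xmm2
  "f30f1175b0"  -- movss DWORD PTR [rbp-0x50],xmm6
  "f30f58de"  -- addss xmm3,xmm6
  "f30f59f0"  -- mulss xmm6,xmm0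
  "f3410f10442408"  -- movss xmm0,DWORD PTR [r12+0x8]
  "f3410f594508"  -- mulss xmm0,DWORD PTR [r13+0x8]
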